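-- pv_equiv track=rewrite | github.com/MarkSchue/agent-skills | skills/atomic-design-system/scripts/md_parser.py | generate_md_template
-- ===== SOURCE A (Python) =====
-- def generate_md_template(ideas: list[str], registry: dict | None = None) -> str:
--     """Generate a structured Markdown template from a list of rough slide ideas."""
--     lines: list[str] = ["---", "design-config: ./design-config.yaml", "---", ""]
--
--     for i, idea in enumerate(ideas):
--         lines.append(f"# {idea}")
--         lines.append("<!-- layout: [TODO: choose template] -->")
--         lines.append("<!-- card: [TODO: choose molecules] -->")
--         lines.append("")
--         lines.append("[TODO: Add slide content here]")
--         lines.append("")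
--         if i < len(ideas) - 1:
--             lines.append("---")
--             lines.append("")
--
--     return "\n".join(lines)
-- ===== SOURCE B (Python) =====
-- def generate_md_template(ideas: list[str], registry: dict | None = None) -> str:
--     """Generate a structured Markdown template from a list of rough slide ideas."""
--     header = "---\ndesign-config: ./design-config.yaml\n---\n"
--     blocks = [
--         f"# {idea}\n"
--         "<!-- layout: [TODO: choose template] -->\n"
--         "<!-- card: [TODO: choose molecules] -->\n"
--         "\n"
--         "[TODO: Add slide content here]\n"
--         for idea in ideas
--     ]
--     if not blocks:
--         return header
--     return header + "\n" + "\n---\n\n".join(blocks)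
-- ===== Notes on version B (the rewrite author's own statement) =====
-- stated objective: idiomatic
-- what changed: B maps each idea to one per-slide block string and joins the blocks with a fixed '\n---\n\n' separator after a constant header, removing A's line-accumulator loop with its i < len(ideas)-1 separator conditional.
import Mathlib
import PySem

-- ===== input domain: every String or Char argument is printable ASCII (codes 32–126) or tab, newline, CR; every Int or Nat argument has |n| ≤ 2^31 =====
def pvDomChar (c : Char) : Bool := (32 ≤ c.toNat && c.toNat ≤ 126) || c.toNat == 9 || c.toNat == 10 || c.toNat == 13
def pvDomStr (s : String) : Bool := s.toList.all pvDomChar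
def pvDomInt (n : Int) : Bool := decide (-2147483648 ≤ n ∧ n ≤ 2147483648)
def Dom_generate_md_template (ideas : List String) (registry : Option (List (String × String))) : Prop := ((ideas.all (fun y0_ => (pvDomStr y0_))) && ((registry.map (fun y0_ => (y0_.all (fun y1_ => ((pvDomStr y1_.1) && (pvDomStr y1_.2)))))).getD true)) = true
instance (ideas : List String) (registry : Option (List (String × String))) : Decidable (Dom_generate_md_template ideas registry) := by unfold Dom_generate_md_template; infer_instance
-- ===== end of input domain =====

-- B replaces A's index-counting loop with conditional separator by a map to per-slide
-- blocks joined with a fixed separator string (objective: idiomatic decomposition).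


-- ===== PORT A =====
-- the six lines A appends for one idea (in A's order)
def aIdeaLines (idea : String) : List String :=
  ["# " ++ idea,
   "<!-- layout: [TODO: choose template] -->",
   "<!-- card: [TODO: choose molecules] -->",
   "",
   "[TODO: Add slide content here]",
   ""]

-- A's for-loop over enumerate(ideas): i is the running index, n = len(ideas)
def aLoop (n : Int) : Int → List String → List String → List String
  | _, [], lines => lines
  | i, idea :: rest, lines =>
      aLoop n (i + 1) rest
        (lines ++ aIdeaLines idea ++ (if i < n - 1 then ["---", ""] else []))

def generate_md_template (ideas : List String) (_registry : Option (List (String × String))) : String :=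
  PySem.Str.join "\n"
    (aLoop (ideas.length : Int) 0 ideas
      ["---", "design-config: ./design-config.yaml", "---", ""])

-- ===== PORT B =====
def bHeader : String := "---\ndesign-config: ./design-config.yaml\n---\n"

def bBlock (idea : String) : String :=
  "# " ++ idea ++ "\n<!-- layout: [TODO: choose template] -->\n<!-- card: [TODO: choose molecules] -->\n\n[TODO: Add slide content here]\n"

def generate_md_template_alt (ideas : List String) (_registry : Option (List (String × String))) : String :=
  match ideas.map bBlock with
  | [] => bHeader
  | blocks => bHeader ++ "\n" ++ PySem.Str.join "\n---\n\n" blocks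

-- ===== PRECONDITION & SPEC =====
def Spec_generate_md_template (ideas : List String) (registry : Option (List (String × String))) (out : String) : Prop := out = generate_md_template_alt ideas registry
instance (ideas : List String) (registry : Option (List (String × String))) (out : String) : Decidable (Spec_generate_md_template ideas registry out) := by unfold Spec_generate_md_template; infer_instance

-- ===== CLAIM (what is proved, stated in full; the proofs are below) =====
def Claim_equal_generate_md_template : Prop := ∀ (ideas : List String) (registry : Option (List (String × String))), Dom_generate_md_template ideas registry → Spec_generate_md_template ideas registry (generate_md_template ideas registry)

-- ===== LEMMAS AND PROOFS =====

-- the list of lines A's loop produces for the ideas, as structural recursion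
def bodyLines : List String → List String
  | [] => []
  | x :: xs => aIdeaLines x ++ (if xs.isEmpty then [] else ["---", ""]) ++ bodyLines xs

theorem aLoop_eq_bodyLines (n : Int) :
    ∀ (rest : List String) (i : Int) (lines : List String),
      i + (rest.length : Int) = n →
      aLoop n i rest lines = lines ++ bodyLines rest := by
  intro rest
  induction rest with
  | nil => intro i lines _; simp [aLoop, bodyLines]
  | cons x xs ih =>
    intro i lines h
    simp only [aLoop, bodyLines]
    rw [ih (i + 1) _ (by simp at h ⊢; omega)]
    cases xs with
    | nil =>
      have : ¬ (i < n - 1) := by simp at h; omega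
      simp [this]
    | cons y ys =>
      have : i < n - 1 := by simp at h; omega
      simp [this]

theorem strJoin_cons_cons (sep a b : String) (rest : List String) :
    PySem.Str.join sep (a :: b :: rest) = a ++ sep ++ PySem.Str.join sep (b :: rest) := by
  apply String.toList_injective
  simp [PySem.Str.join, PySem.Chars.join_cons_cons]

theorem join_block_last (x : String) :
    PySem.Str.join "\n" (aIdeaLines x) = bBlock x := by
  apply String.toList_injective
  simp [aIdeaLines, bBlock, PySem.Str.join,
    PySem.Chars.join_cons_cons, PySem.Chars.join_singleton]

theorem join_block_sep (x r : String) (rs : List String) :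
    PySem.Str.join "\n" (aIdeaLines x ++ ["---", ""] ++ r :: rs) =
      bBlock x ++ "\n---\n\n" ++ PySem.Str.join "\n" (r :: rs) := by
  apply String.toList_injective
  simp [aIdeaLines, bBlock, PySem.Str.join, PySem.Chars.join_cons_cons]

theorem bodyLines_cons (y : String) (ys : List String) :
    ∃ r rs, bodyLines (y :: ys) = r :: rs := by
  cases ys <;> simp [bodyLines, aIdeaLines]

theorem join_body (x : String) (xs : List String) :
    PySem.Str.join "\n" (bodyLines (x :: xs)) =
      PySem.Str.join "\n---\n\n" ((x :: xs).map bBlock) := by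
  induction xs generalizing x with
  | nil =>
    simp only [bodyLines, List.isEmpty_nil, if_pos, List.append_nil, List.map]
    rw [join_block_last]
    apply String.toList_injective
    simp [PySem.Str.join, PySem.Chars.join_singleton]
  | cons y ys ih =>
    obtain ⟨r, rs, hr⟩ := bodyLines_cons y ys
    have hstep : bodyLines (x :: y :: ys) = aIdeaLines x ++ ["---", ""] ++ bodyLines (y :: ys) := by
      simp [bodyLines]
    rw [hstep, hr, join_block_sep, ← hr, ih y, List.map_cons, List.map_cons]
    rw [List.map_cons, strJoin_cons_cons]

theorem join_header (r : String) (rs : List String) :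
    PySem.Str.join "\n" (["---", "design-config: ./design-config.yaml", "---", ""] ++ r :: rs) =
      bHeader ++ "\n" ++ PySem.Str.join "\n" (r :: rs) := by
  apply String.toList_injective
  simp [bHeader, PySem.Str.join, PySem.Chars.join_cons_cons]

theorem generate_md_template_spec : Claim_equal_generate_md_template := by
  intro ideas registry _
  unfold Spec_generate_md_template generate_md_template generate_md_template_alt
  rw [aLoop_eq_bodyLines (ideas.length : Int) ideas 0 _ (by simp)]
  cases ideas with
  | nil =>
    simp only [bodyLines, List.append_nil, List.map_nil]
    decide
  | cons x xs =>
    obtain ⟨r, rs, hr⟩ := bodyLines_cons x xs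
    rw [hr, join_header, ← hr, join_body]
    rfl
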